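-- pv_equiv track=rewrite | github.com/nra2629/Sleepscan1 | utils/plotter.py | get_runs
-- ===== SOURCE A (Python) =====
-- def get_runs(stages):
--     if not stages:
--         return []
--     runs = []
--     cur, start = stages[0], 0
--     for i in range(1, len(stages)):
--         if stages[i] != cur:
--             runs.append((cur, start, i - 1))
--             cur, start = stages[i], i
--     runs.append((cur, start, len(stages) - 1))
--     return runs
-- ===== SOURCE B (Python) =====
-- def get_runs(stages):
--     if not stages:
--         return []
--     n = len(stages)
--     bounds = [0] + [i for i in range(1, n) if stages[i] != stages[i - 1]] + [n]
--     return [(stages[bounds[j]], bounds[j], bounds[j + 1] - 1)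
--             for j in range(len(bounds) - 1)]
-- ===== Notes on version B (the rewrite author's own statement) =====
-- stated objective: alternative
-- what changed: B first computes the list of change-point boundary indices in one pass, then builds the runs by pairing consecutive boundaries, instead of A's single pass carrying cur/start state and appending runs as it goes.
import Mathlib
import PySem

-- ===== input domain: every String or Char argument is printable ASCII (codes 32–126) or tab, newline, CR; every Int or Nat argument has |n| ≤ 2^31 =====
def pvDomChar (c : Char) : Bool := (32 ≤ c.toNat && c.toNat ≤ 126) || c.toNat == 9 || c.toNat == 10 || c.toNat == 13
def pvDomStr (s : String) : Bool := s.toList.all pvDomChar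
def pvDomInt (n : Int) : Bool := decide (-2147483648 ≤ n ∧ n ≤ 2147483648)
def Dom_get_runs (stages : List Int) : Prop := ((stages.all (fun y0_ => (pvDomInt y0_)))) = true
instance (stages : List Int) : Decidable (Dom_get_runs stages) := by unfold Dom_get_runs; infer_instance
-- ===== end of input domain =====

-- B replaces A's one-pass cur/start run accumulator with a boundary-index list paired
-- into runs in a second pass (objective: alternative decomposition, same O(n) cost).

-- ===== PORT A =====
-- state (runs, cur, start); loop 'for i in range(1, len(stages))'
def get_runs (stages : List Int) : List (Int × Int × Int) :=
  if stages = [] then []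
  else
    let st := (PySem.List.pyRange 1 (stages.length : Int) 1).foldl
      (fun (s : List (Int × Int × Int) × Int × Int) i =>
        if PySem.List.pyGetD stages i 0 ≠ s.2.1 then
          (s.1 ++ [(s.2.1, s.2.2, i - 1)], PySem.List.pyGetD stages i 0, i)
        else s)
      ([], PySem.List.pyGetD stages 0 0, 0)
    st.1 ++ [(st.2.1, st.2.2, (stages.length : Int) - 1)]

-- ===== PORT B =====
-- bounds = [0] + [i for i in range(1, n) if stages[i] != stages[i-1]] + [n];
-- runs = [(stages[bounds[j]], bounds[j], bounds[j+1]-1) for j in range(len(bounds)-1)]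
def get_runs_alt (stages : List Int) : List (Int × Int × Int) :=
  if stages = [] then []
  else
    let n : Int := stages.length
    let bounds := [0] ++ (PySem.List.pyRange 1 n 1).filter
        (fun i => PySem.List.pyGetD stages i 0 ≠ PySem.List.pyGetD stages (i - 1) 0) ++ [n]
    (PySem.List.pyRange 0 ((bounds.length : Int) - 1) 1).map
      (fun j => (PySem.List.pyGetD stages (PySem.List.pyGetD bounds j 0) 0,
                 PySem.List.pyGetD bounds j 0,
                 PySem.List.pyGetD bounds (j + 1) 0 - 1))

-- ===== PRECONDITION & SPEC =====
def Spec_get_runs (stages : List Int) (out : List (Int × Int × Int)) : Prop := out = get_runs_alt stages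
instance (stages : List Int) (out : List (Int × Int × Int)) : Decidable (Spec_get_runs stages out) := by unfold Spec_get_runs; infer_instance

-- ===== CLAIM (what is proved, stated in full; the proofs are below) =====
def Claim_equal_get_runs : Prop := ∀ (stages : List Int), Dom_get_runs stages → Spec_get_runs stages (get_runs stages)

-- ===== LEMMAS AND PROOFS =====

def runsAdj (g : Int → Int) : List Int → List (Int × Int × Int)
  | [] => []
  | [_] => []
  | b :: b' :: rest => (g b, b, b' - 1) :: runsAdj g (b' :: rest)

theorem pyGetD_cons_succ (x : Int) (xs : List Int) (k : Int) (hk : 0 ≤ k) :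
    PySem.List.pyGetD (x :: xs) (k + 1) 0 = PySem.List.pyGetD xs k 0 := by
  obtain ⟨n, rfl⟩ := Int.eq_ofNat_of_zero_le hk
  have h : ((n : Int) + 1) = ((n + 1 : Nat) : Int) := by push_cast; ring
  rw [h, PySem.List.pyGetD_natCast, PySem.List.pyGetD_natCast]
  simp

theorem runsAdj_append (g : Int → Int) (bs : List Int) (b0 n : Int) :
    runsAdj g ((b0 :: bs) ++ [n])
      = runsAdj g (b0 :: bs) ++ [(g ((b0 :: bs).getLastD 0), (b0 :: bs).getLastD 0, n - 1)] := by
  induction bs generalizing b0 with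
  | nil => simp [runsAdj]
  | cons b1 rest ih => simpa [runsAdj] using ih b1

theorem cons_append_getLastD (x n : Int) (l : List Int) :
    (x :: (l ++ [n])).getLastD 0 = n := by
  rw [show x :: (l ++ [n]) = (x :: l) ++ [n] from rfl, List.getLastD_concat]

theorem cons_append_getLast? (x n : Int) (l : List Int) :
    (x :: (l ++ [n])).getLast?.getD 0 = n := by
  rw [show x :: (l ++ [n]) = (x :: l) ++ [n] from rfl, List.getLast?_concat]; rfl

theorem map_pairs_eq_runsAdj (g : Int → Int) (bs : List Int) :
    (PySem.List.pyRange 0 ((bs.length : Int) - 1) 1).map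
      (fun j => (g (PySem.List.pyGetD bs j 0),
                 PySem.List.pyGetD bs j 0,
                 PySem.List.pyGetD bs (j + 1) 0 - 1)) = runsAdj g bs := by
  induction bs with
  | nil => simp [PySem.List.pyRange_one_eq_nil, runsAdj]
  | cons b bs ih =>
    cases bs with
    | nil => simp [PySem.List.pyRange_one_eq_nil, runsAdj]
    | cons b' rest =>
      have hlen : (((b :: b' :: rest).length : Int) - 1) = ((rest.length : Int) + 1) := by
        simp
      rw [hlen, PySem.List.pyRange_one_cons (by omega), List.map_cons]
      have hshift : (PySem.List.pyRange (0+1) ((rest.length : Int) + 1) 1).map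
          (fun j => (g (PySem.List.pyGetD (b :: b' :: rest) j 0),
                     PySem.List.pyGetD (b :: b' :: rest) j 0,
                     PySem.List.pyGetD (b :: b' :: rest) (j + 1) 0 - 1))
          = (PySem.List.pyRange 0 (((b' :: rest).length : Int) - 1) 1).map
          (fun j => (g (PySem.List.pyGetD (b' :: rest) j 0),
                     PySem.List.pyGetD (b' :: rest) j 0,
                     PySem.List.pyGetD (b' :: rest) (j + 1) 0 - 1)) := by
        have hl2 : (((b' :: rest).length : Int) - 1) = (rest.length : Int) := by simp
        rw [hl2, PySem.List.pyRange_one, PySem.List.pyRange_one]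
        simp only [List.map_map]
        have heq : ((rest.length : Int) + 1 - (0 + 1)).toNat = ((rest.length : Int) - 0).toNat := by
          simp
        rw [heq]
        apply List.map_congr_left
        intro k hk
        simp only [Function.comp]
        have h0 : (0 : Int) + 1 + (k : Int) = ((k : Int)) + 1 := by ring
        have h1 : (0 : Int) + (k : Int) = (k : Int) := by ring
        rw [h0, h1, pyGetD_cons_succ _ _ _ (by positivity),
            pyGetD_cons_succ _ _ _ (by positivity)]
      rw [hshift, ih]
      simp only [runsAdj]
      congr 1
      have h1 : PySem.List.pyGetD (b :: b' :: rest) 1 0 = b' := by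
        have := pyGetD_cons_succ b (b' :: rest) 0 le_rfl
        simpa [PySem.List.pyGetD_zero_cons] using this
      simp [PySem.List.pyGetD_zero_cons, h1]

theorem fold_invariant (stages : List Int) (k : Nat) (hk : 1 ≤ k) :
    ((PySem.List.pyRange 1 (k : Int) 1).foldl
      (fun (s : List (Int × Int × Int) × Int × Int) i =>
        if PySem.List.pyGetD stages i 0 ≠ s.2.1 then
          (s.1 ++ [(s.2.1, s.2.2, i - 1)], PySem.List.pyGetD stages i 0, i)
        else s)
      ([], PySem.List.pyGetD stages 0 0, 0)
      = (runsAdj (fun i => PySem.List.pyGetD stages i 0)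
           (0 :: (PySem.List.pyRange 1 (k : Int) 1).filter
              (fun i => PySem.List.pyGetD stages i 0 ≠ PySem.List.pyGetD stages (i - 1) 0)),
         PySem.List.pyGetD stages ((k : Int) - 1) 0,
         (0 :: (PySem.List.pyRange 1 (k : Int) 1).filter
              (fun i => PySem.List.pyGetD stages i 0 ≠ PySem.List.pyGetD stages (i - 1) 0)).getLastD 0))
    ∧ PySem.List.pyGetD stages
        ((0 :: (PySem.List.pyRange 1 (k : Int) 1).filter
              (fun i => PySem.List.pyGetD stages i 0 ≠ PySem.List.pyGetD stages (i - 1) 0)).getLastD 0) 0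
      = PySem.List.pyGetD stages ((k : Int) - 1) 0 := by
  induction k, hk using Nat.le_induction with
  | base =>
    rw [PySem.List.pyRange_one_eq_nil (by norm_num)]
    simp [runsAdj]
  | succ k hk ih =>
    have hcast : (((k + 1 : Nat)) : Int) = (k : Int) + 1 := by push_cast; ring
    rw [hcast, PySem.List.pyRange_one_succ_right (by exact_mod_cast hk),
        List.foldl_append, List.filter_append, ih.1]
    have hsimp : ((k : Int) + 1 - 1) = (k : Int) := by ring
    rw [hsimp]
    by_cases h : PySem.List.pyGetD stages (k : Int) 0 = PySem.List.pyGetD stages ((k : Int) - 1) 0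
    · simp only [List.foldl_cons, List.foldl_nil, List.filter_cons, List.filter_nil, h]
      refine ⟨by simp, by simpa using ih.2⟩
    · rw [List.foldl_cons, List.foldl_nil,
          List.filter_cons_of_pos (by simpa using h), List.filter_nil]
      rw [if_pos (by simpa using h)]
      refine ⟨?_, by rw [cons_append_getLastD]⟩
      rw [show (0 :: (List.filter
            (fun i => decide (PySem.List.pyGetD stages i 0 ≠ PySem.List.pyGetD stages (i - 1) 0))
            (PySem.List.pyRange 1 (k : Int) 1) ++ [(k : Int)]))
          = (0 :: List.filter
            (fun i => decide (PySem.List.pyGetD stages i 0 ≠ PySem.List.pyGetD stages (i - 1) 0))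
            (PySem.List.pyRange 1 (k : Int) 1)) ++ [(k : Int)] from rfl,
         runsAdj_append]
      have ih2' : PySem.List.pyGetD stages
          ((0 :: List.filter (fun i => !decide (PySem.List.pyGetD stages i 0 = PySem.List.pyGetD stages (i - 1) 0))
              (PySem.List.pyRange 1 (k : Int) 1)).getLast?.getD 0) 0
          = PySem.List.pyGetD stages ((k : Int) - 1) 0 := by simpa using ih.2
      simp [ih2', cons_append_getLast?]

-- ===== VERDICT (by name: the statement is the Claim_ definition above) =====
theorem get_runs_spec : Claim_equal_get_runs := by
  intro stages _
  unfold Spec_get_runs get_runs get_runs_alt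
  by_cases hnil : stages = []
  · simp [hnil]
  · rw [if_neg hnil, if_neg hnil]
    have hk : 1 ≤ stages.length := List.length_pos_iff.mpr hnil
    have inv := fold_invariant stages stages.length hk
    simp only [inv.1]
    rw [show ([(0 : Int)] ++ (PySem.List.pyRange 1 (stages.length : Int) 1).filter
          (fun i => PySem.List.pyGetD stages i 0 ≠ PySem.List.pyGetD stages (i - 1) 0)
          ++ [(stages.length : Int)])
        = ((0 : Int) :: (PySem.List.pyRange 1 (stages.length : Int) 1).filter
          (fun i => PySem.List.pyGetD stages i 0 ≠ PySem.List.pyGetD stages (i - 1) 0))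
          ++ [(stages.length : Int)] from rfl]
    refine Eq.trans ?_ (map_pairs_eq_runsAdj (fun i => PySem.List.pyGetD stages i 0) _).symm
    show _ = runsAdj (fun i => PySem.List.pyGetD stages i 0)
        (((0 : Int) :: (PySem.List.pyRange 1 (stages.length : Int) 1).filter
          (fun i => PySem.List.pyGetD stages i 0 ≠ PySem.List.pyGetD stages (i - 1) 0))
          ++ [(stages.length : Int)])
    rw [runsAdj_append, inv.2]
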